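-- pv_equiv track=rewrite | github.com/leehj8896/Algorithm-solution | 문제풀이/다리만들기/solution.py | get_part_list
-- ===== SOURCE A (Python) =====
-- def get_new_position(pos, d):
--
--     if d == 'up':
--         return (pos[0]-1,pos[1])
--
--     if d == 'down':
--         return (pos[0]+1,pos[1])
--
--     if d == 'right':
--         return (pos[0],pos[1]+1)
--
--     if d == 'left':
--         return (pos[0],pos[1]-1)
--
-- def out(n, pos):
--
--     if pos[0] >= 0 and pos[0] < n:
--         if pos[1] >= 0 and pos[1] < n:
--             return False
--     return True
--
-- def dfs(n, board, visited, curr_pos, pos_set):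
--
--     visited[curr_pos[0]][curr_pos[1]] = True
--
--     for d in ['up','down','right','left']:
--
--         new_pos = get_new_position(curr_pos, d)
--
--         if out(n, new_pos):
--             continue
--         if board[new_pos[0]][new_pos[1]] == 0:
--             pos_set.add(curr_pos)
--             continue
--         if visited[new_pos[0]][new_pos[1]]:
--             continue
--         dfs(n, board, visited, new_pos, pos_set)
--
-- def get_part_list(n, board):
--
--     visited = [[False for j in range(n)] for i in range(n)]
--
--     part_list = []
--
--     for i in range(n):
--         for j in range(n):
--
--             if board[i][j] == 0:
--                 continue
--             if visited[i][j]: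
--                 continue
--
--             pos_set = set()
--             dfs(n, board, visited, (i,j), pos_set)
--             part_list.append(pos_set)
--
--     return part_list
-- ===== SOURCE B (Python) =====
-- def get_part_list(n, board):
--     # iterative flood fill with an explicit stack of (cell, remaining-directions) frames
--     deltas = ((-1, 0), (1, 0), (0, 1), (0, -1))
--     visited = [[False] * n for _ in range(n)]
--     part_list = []
--     for i in range(n):
--         for j in range(n):
--             if board[i][j] == 0 or visited[i][j]:
--                 continue
--             visited[i][j] = True
--             pos_set = set()
--             stack = [((i, j), list(deltas))]
--             while stack:
--                 pos, ds = stack.pop()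
--                 if not ds:
--                     continue
--                 d = ds[0]
--                 stack.append((pos, ds[1:]))
--                 x, y = pos[0] + d[0], pos[1] + d[1]
--                 if 0 <= x < n and 0 <= y < n:
--                     if board[x][y] == 0:
--                         pos_set.add(pos)
--                     elif not visited[x][y]:
--                         visited[x][y] = True
--                         stack.append(((x, y), list(deltas)))
--             part_list.append(pos_set)
--     return part_list
-- ===== Notes on version B (the rewrite author's own statement) =====
-- stated objective: alternative
-- what changed: The recursive DFS (helper functions dfs/get_new_position/out with direction names) is replaced by an iterative flood fill driven by an explicit stack of (cell, remaining-directions) frames with numeric deltas, marking cells visited on push instead of on call entry.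
import Mathlib
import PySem

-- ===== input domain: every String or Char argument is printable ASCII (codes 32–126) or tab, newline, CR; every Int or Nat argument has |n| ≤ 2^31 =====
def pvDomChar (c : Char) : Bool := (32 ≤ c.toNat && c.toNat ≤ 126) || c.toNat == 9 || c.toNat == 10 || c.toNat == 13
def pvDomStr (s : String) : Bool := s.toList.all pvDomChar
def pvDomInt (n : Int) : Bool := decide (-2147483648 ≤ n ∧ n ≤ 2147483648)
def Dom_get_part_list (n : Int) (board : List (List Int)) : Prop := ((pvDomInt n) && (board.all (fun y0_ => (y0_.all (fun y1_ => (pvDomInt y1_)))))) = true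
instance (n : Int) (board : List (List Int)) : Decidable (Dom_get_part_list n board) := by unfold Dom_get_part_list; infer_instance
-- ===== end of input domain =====

-- B replaces A's recursive DFS by an iterative flood fill with an explicit stack of
-- (cell, remaining-directions) frames (alternative decomposition, same cost); return values proved equal.

-- Shared grid accessors: both Pythons index board/visited identically, and every call site
-- guards the indices with 0 ≤ · < n, where .toNat/getD equals Python indexing.
def pvCell (board : List (List Int)) (p : Int × Int) : Int :=
  (board.getD p.1.toNat []).getD p.2.toNat 0

def pvVis (v : List (List Bool)) (p : Int × Int) : Bool :=
  (v.getD p.1.toNat []).getD p.2.toNat false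

def pvMark (v : List (List Bool)) (p : Int × Int) : List (List Bool) :=
  v.set p.1.toNat ((v.getD p.1.toNat []).set p.2.toNat true)

-- ===== PORT A =====
def pvGetNewPosition (pos : Int × Int) (d : String) : Option (Int × Int) :=
  if d = "up" then some (pos.1 - 1, pos.2)
  else if d = "down" then some (pos.1 + 1, pos.2)
  else if d = "right" then some (pos.1, pos.2 + 1)
  else if d = "left" then some (pos.1, pos.2 - 1)
  else none   -- Python's implicit None; unreachable at every call site

def pvOut (n : Int) (pos : Int × Int) : Bool :=
  if 0 ≤ pos.1 ∧ pos.1 < n then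
    if 0 ≤ pos.2 ∧ pos.2 < n then false else true
  else true

mutual
-- dfs of A; the fuel is only a termination guard (Python's recursion has none): each
-- recursive call marks a fresh cell, so fuel n²+1 (used below) is never exhausted.
def pvDfs (fuel : Nat) (n : Int) (board : List (List Int)) (curr : Int × Int)
    (st : List (List Bool) × List (Int × Int)) : List (List Bool) × List (Int × Int) :=
  match fuel with
  | 0 => st
  | fuel' + 1 =>
      pvDfsDirs fuel' n board curr ["up", "down", "right", "left"] (pvMark st.1 curr, st.2)
  termination_by (fuel, 0)

-- the for-loop over directions inside dfs
def pvDfsDirs (fuel : Nat) (n : Int) (board : List (List Int)) (curr : Int × Int)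
    (ds : List String) (st : List (List Bool) × List (Int × Int)) :
    List (List Bool) × List (Int × Int) :=
  match ds with
  | [] => st
  | d :: ds' =>
      let st' :=
        match pvGetNewPosition curr d with
        | none => st
        | some new_pos =>
          if pvOut n new_pos then st
          else if pvCell board new_pos = 0 then (st.1, PySem.Set.add st.2 curr)
          else if pvVis st.1 new_pos then st
          else pvDfs fuel n board new_pos st
      pvDfsDirs fuel n board curr ds' st'
  termination_by (fuel, ds.length + 1)
end

def get_part_list (n : Int) (board : List (List Int)) : List (List (Int × Int)) :=
  let visited : List (List Bool) := List.replicate n.toNat (List.replicate n.toNat false)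
  ((PySem.List.pyRange 0 n 1).foldl (fun acc i =>
      (PySem.List.pyRange 0 n 1).foldl (fun acc j =>
        if pvCell board (i, j) = 0 then acc
        else if pvVis acc.1 (i, j) then acc
        else
          let r := pvDfs (n.toNat * n.toNat + 1) n board (i, j) (acc.1, [])
          (r.1, acc.2 ++ [r.2])) acc) (visited, ([] : List (List (Int × Int))))).2

-- ===== PORT B =====
def pvDeltas : List (Int × Int) := [(-1, 0), (1, 0), (0, 1), (0, -1)]

-- number of unvisited entries; used (with pvWeight) only for pvRun's termination measure
def pvFcount (v : List (List Bool)) : Nat :=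
  (v.map (fun r => r.countP (fun b => !b))).sum

def pvWeight (stack : List ((Int × Int) × List (Int × Int))) : Nat :=
  (stack.map (fun f => f.2.length + 1)).sum

theorem pvCountP_set_true_lt (r : List Bool) (b : Nat) (hb : b < r.length)
    (hf : r.getD b false = false) :
    (r.set b true).countP (fun x => !x) < r.countP (fun x => !x) := by
  induction r generalizing b with
  | nil => simp at hb
  | cons c t ih =>
    cases b with
    | zero =>
      simp only [List.getD_cons_zero] at hf
      subst hf
      simp
    | succ b' =>
      simp only [List.set_cons_succ, List.countP_cons]
      have := ih b' (by simpa using hb) (by simpa using hf)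
      omega

theorem pvFcount_set_lt (v : List (List Bool)) (a : Nat) (r' : List Bool) (ha : a < v.length)
    (h : r'.countP (fun x => !x) < (v.getD a []).countP (fun x => !x)) :
    pvFcount (v.set a r') < pvFcount v := by
  induction v generalizing a with
  | nil => simp at ha
  | cons c t ih =>
    cases a with
    | zero =>
      simp only [List.getD_cons_zero] at h
      simp [pvFcount, List.set_cons_zero]
      omega
    | succ a' =>
      have := ih a' (by simpa using ha) (by simpa using h)
      simp only [pvFcount, List.set_cons_succ, List.map_cons, List.sum_cons] at *
      omega

theorem pvFcount_mark_lt (v : List (List Bool)) (x y : Int)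
    (hx : x.toNat < v.length) (hy : y.toNat < (v.getD x.toNat []).length)
    (hv : pvVis v (x, y) = false) :
    pvFcount (pvMark v (x, y)) < pvFcount v := by
  exact pvFcount_set_lt v x.toNat _ hx (pvCountP_set_true_lt _ _ hy hv)

-- iterative flood fill: pop a frame, try its first remaining direction, push the
-- continuation and (for a fresh land neighbour) the neighbour frame
def pvRun (n : Int) (board : List (List Int))
    (stack : List ((Int × Int) × List (Int × Int)))
    (st : List (List Bool) × List (Int × Int)) : List (List Bool) × List (Int × Int) :=
  match stack, st with
  | [], st => st
  | (_, []) :: rest, st => pvRun n board rest st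
  | (pos, d :: ds) :: rest, (v, ps) =>
      let x := pos.1 + d.1
      let y := pos.2 + d.2
      if 0 ≤ x ∧ x < n ∧ 0 ≤ y ∧ y < n then
        if pvCell board (x, y) = 0 then
          pvRun n board ((pos, ds) :: rest) (v, PySem.Set.add ps pos)
        else if hv : pvVis v (x, y) then
          pvRun n board ((pos, ds) :: rest) (v, ps)
        else
          -- totality guard only: the entry being marked exists in every grid pvRun is applied to
          if h : x.toNat < v.length ∧ y.toNat < (v.getD x.toNat []).length then
            pvRun n board (((x, y), pvDeltas) :: (pos, ds) :: rest) (pvMark v (x, y), ps)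
          else
            pvRun n board ((pos, ds) :: rest) (v, ps)
      else
        pvRun n board ((pos, ds) :: rest) (v, ps)
  termination_by 10 * pvFcount st.1 + pvWeight stack
  decreasing_by
  all_goals first
  | (simp [pvWeight]; omega)
  | (have := pvFcount_mark_lt v (pos.1 + d.1) (pos.2 + d.2) h.1 h.2 (by simpa using hv)
     simp [pvWeight, pvDeltas]; omega)
  | simp [pvWeight]

def get_part_list_alt (n : Int) (board : List (List Int)) : List (List (Int × Int)) :=
  let visited : List (List Bool) := List.replicate n.toNat (List.replicate n.toNat false)
  ((PySem.List.pyRange 0 n 1).foldl (fun acc i =>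
      (PySem.List.pyRange 0 n 1).foldl (fun acc j =>
        if pvCell board (i, j) = 0 then acc
        else if pvVis acc.1 (i, j) then acc
        else
          let r := pvRun n board [((i, j), pvDeltas)] (pvMark acc.1 (i, j), [])
          (r.1, acc.2 ++ [r.2])) acc) (visited, ([] : List (List (Int × Int))))).2

-- ===== PRECONDITION & SPEC =====
-- Pre_ excludes exactly the inputs where Python A raises an IndexError:
-- boards with fewer than n rows, or whose first n rows have fewer than n columns.
def Pre_get_part_list (n : Int) (board : List (List Int)) : Prop :=
  n ≤ (board.length : Int) ∧ ∀ r ∈ board.take n.toNat, n ≤ (r.length : Int)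

instance (n : Int) (board : List (List Int)) : Decidable (Pre_get_part_list n board) := by
  unfold Pre_get_part_list; infer_instance

def pvWitness_get_part_list : Int × List (List Int) := (2, [[1, 0], [0, 1]])

def Spec_get_part_list (n : Int) (board : List (List Int)) (out : List (List (Int × Int))) : Prop := out = get_part_list_alt n board
instance (n : Int) (board : List (List Int)) (out : List (List (Int × Int))) : Decidable (Spec_get_part_list n board out) := by unfold Spec_get_part_list; infer_instance

-- ===== CLAIM (what is proved, stated in full; the proofs are below) =====
def Claim_equal_get_part_list : Prop := ∀ (n : Int) (board : List (List Int)), Dom_get_part_list n board → Pre_get_part_list n board → Spec_get_part_list n board (get_part_list n board)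

-- ===== LEMMAS AND PROOFS =====

-- grid-shape invariant: an n.toNat × n.toNat visited grid
def pvInv (N : Nat) (v : List (List Bool)) : Prop :=
  v.length = N ∧ ∀ r ∈ v, r.length = N

theorem pvInv_mark {N : Nat} {v : List (List Bool)} (p : Int × Int) (h : pvInv N v) :
    pvInv N (pvMark v p) := by
  by_cases hx : p.1.toNat < v.length
  · refine ⟨by simp [pvMark, h.1], ?_⟩
    intro r hr
    rcases List.mem_or_eq_of_mem_set hr with hr' | hr'
    · exact h.2 r hr'
    · subst hr'
      rw [List.length_set, List.getD_eq_getElem v [] hx]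
      exact h.2 _ (List.getElem_mem hx)
  · have he : pvMark v p = v := by
      unfold pvMark; exact List.set_eq_of_length_le (by omega)
    rw [he]; exact h

theorem pvCountP_set_true_le (r : List Bool) (b : Nat) :
    (r.set b true).countP (fun x => !x) ≤ r.countP (fun x => !x) := by
  induction r generalizing b with
  | nil => simp
  | cons c t ih =>
    cases b with
    | zero => cases c <;> simp
    | succ b' =>
      simp only [List.set_cons_succ, List.countP_cons]
      have := ih b'
      omega

theorem pvFcount_set_le (v : List (List Bool)) (a : Nat) (r' : List Bool)
    (h : r'.countP (fun x => !x) ≤ (v.getD a []).countP (fun x => !x)) :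
    pvFcount (v.set a r') ≤ pvFcount v := by
  induction v generalizing a with
  | nil => simp [pvFcount]
  | cons c t ih =>
    cases a with
    | zero =>
      simp only [List.getD_cons_zero] at h
      simp [pvFcount, List.set_cons_zero]
      omega
    | succ a' =>
      have := ih a' (by simpa using h)
      simp only [pvFcount, List.set_cons_succ, List.map_cons, List.sum_cons] at *
      omega

theorem pvFcount_mark_le (v : List (List Bool)) (p : Int × Int) :
    pvFcount (pvMark v p) ≤ pvFcount v :=
  pvFcount_set_le v p.1.toNat _ (pvCountP_set_true_le _ _)

theorem pvFcount_le_aux (N : Nat) : ∀ (v : List (List Bool)), (∀ r ∈ v, r.length = N) →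
    pvFcount v ≤ v.length * N := by
  intro v
  induction v with
  | nil => simp [pvFcount]
  | cons c t ih =>
    intro h
    have h1 : c.countP (fun x => !x) ≤ N := by
      have := List.countP_le_length (l := c) (p := fun x => !x)
      rw [h c List.mem_cons_self] at this
      exact this
    have h2 := ih (fun r hr => h r (List.mem_cons_of_mem _ hr))
    simp only [pvFcount, List.map_cons, List.sum_cons, List.length_cons] at *
    calc c.countP (fun x => !x) + (t.map (fun r => r.countP (fun b => !b))).sum
        ≤ N + t.length * N := by omega
      _ = (t.length + 1) * N := by ring
  -- (the nil/cons bullets above prove: every row ≤ N, rows many)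

theorem pvFcount_le_sq {N : Nat} {v : List (List Bool)} (h : pvInv N v) :
    pvFcount v ≤ N * N := by
  have := pvFcount_le_aux N v h.2
  rw [h.1] at this
  exact this

-- direction string of A ↔ delta of B
def pvRel (s : String) (d : Int × Int) : Prop :=
  ∀ p : Int × Int, pvGetNewPosition p s = some (p.1 + d.1, p.2 + d.2)

theorem pvRel_dirs : List.Forall₂ pvRel ["up", "down", "right", "left"] pvDeltas := by
  refine .cons ?_ (.cons ?_ (.cons ?_ (.cons ?_ .nil))) <;>
    intro p <;> simp [pvGetNewPosition] <;> omega

theorem pvOut_false_iff (n : Int) (p : Int × Int) :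
    pvOut n p = false ↔ 0 ≤ p.1 ∧ p.1 < n ∧ 0 ≤ p.2 ∧ p.2 < n := by
  unfold pvOut
  split_ifs with h1 h2 <;> simp <;> omega

-- pvDfsDirs preserves the grid shape and never increases the unvisited count
theorem pvDfsDirs_mono (fuel : Nat) : ∀ (n : Int) (board : List (List Int))
    (ds : List String) (curr : Int × Int) (st : List (List Bool) × List (Int × Int)),
    pvInv n.toNat st.1 →
    pvInv n.toNat (pvDfsDirs fuel n board curr ds st).1 ∧
      pvFcount (pvDfsDirs fuel n board curr ds st).1 ≤ pvFcount st.1 := by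
  induction fuel with
  | zero =>
    intro n board ds
    induction ds with
    | nil => intro curr st h; rw [pvDfsDirs]; exact And.intro h (le_refl _)
    | cons d ds' ih =>
      intro curr st h
      rw [pvDfsDirs]
      split
      · exact ih curr st h
      · split_ifs with h1 h2 h3
        · exact ih curr st h
        · exact ih curr (st.1, PySem.Set.add st.2 curr) h
        · exact ih curr st h
        · rename_i np _
          have hz : pvDfs 0 n board np st = st := by rw [pvDfs]
          rw [hz]
          exact ih curr st h
  | succ f ihf =>
    intro n board ds
    induction ds with
    | nil => intro curr st h; rw [pvDfsDirs]; exact And.intro h (le_refl _)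
    | cons d ds' ih =>
      intro curr st h
      rw [pvDfsDirs]
      split
      · exact ih curr st h
      · split_ifs with h1 h2 h3
        · exact ih curr st h
        · exact ih curr (st.1, PySem.Set.add st.2 curr) h
        · exact ih curr st h
        · rename_i np _
          have hz : pvDfs (f + 1) n board np st
              = pvDfsDirs f n board np ["up", "down", "right", "left"] (pvMark st.1 np, st.2) := by
            rw [pvDfs]
          rw [hz]
          have hm : pvInv n.toNat (pvMark st.1 np) := pvInv_mark np h
          have hrec := ihf n board ["up", "down", "right", "left"] np (pvMark st.1 np, st.2) hm
          have hres := ih curr _ hrec.1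
          refine ⟨hres.1, le_trans hres.2 ?_⟩
          exact le_trans hrec.2 (pvFcount_mark_le st.1 np)

-- the stack machine simulates one dfs direction-loop and returns to the rest of the stack
theorem pvSim : ∀ (k fuel : Nat) (n : Int) (board : List (List Int))
    (v : List (List Bool)) (ps : List (Int × Int)) (pos : Int × Int)
    (dsS : List String) (dsD : List (Int × Int))
    (rest : List ((Int × Int) × List (Int × Int))),
    List.Forall₂ pvRel dsS dsD → pvInv n.toNat v → pvFcount v ≤ fuel →
    10 * pvFcount v + dsS.length ≤ k →
    pvRun n board ((pos, dsD) :: rest) (v, ps)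
      = pvRun n board rest (pvDfsDirs fuel n board pos dsS (v, ps)) := by
  intro k
  induction k with
  | zero =>
    intro fuel n board v ps pos dsS dsD rest hrel hinv hfc hk
    have h1 : dsS = [] := by
      cases dsS with
      | nil => rfl
      | cons a b => simp at hk
    subst h1
    cases hrel
    simp [pvRun, pvDfsDirs]
  | succ k ih =>
    intro fuel n board v ps pos dsS dsD rest hrel hinv hfc hk
    cases hrel with
    | nil => simp [pvRun, pvDfsDirs]
    | @cons dS dD dsS' dsD' h1 h2 =>
      have hnp := h1 pos
      rw [pvDfsDirs, hnp]
      simp only []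
      simp only [List.length_cons] at hk
      by_cases hb : 0 ≤ pos.1 + dD.1 ∧ pos.1 + dD.1 < n ∧ 0 ≤ pos.2 + dD.2 ∧ pos.2 + dD.2 < n
      · have hout : pvOut n (pos.1 + dD.1, pos.2 + dD.2) = false := by
          rw [pvOut_false_iff]; exact hb
        simp only [hout, Bool.false_eq_true, if_false]
        by_cases hw : pvCell board (pos.1 + dD.1, pos.2 + dD.2) = 0
        · rw [pvRun]
          simp only [if_pos hb, if_pos hw]
          exact ih fuel n board v _ pos dsS' dsD' rest h2 hinv hfc (by omega)
        · by_cases hv : pvVis v (pos.1 + dD.1, pos.2 + dD.2) = true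
          · rw [pvRun]
            simp only [if_pos hb, if_neg hw, dif_pos hv, if_pos hv]
            exact ih fuel n board v ps pos dsS' dsD' rest h2 hinv hfc (by omega)
          · -- fresh land neighbour: A recurses, B pushes
            have hx : (pos.1 + dD.1).toNat < v.length := by
              rw [hinv.1]; omega
            have hy : (pos.2 + dD.2).toNat < (v.getD (pos.1 + dD.1).toNat []).length := by
              rw [List.getD_eq_getElem v [] hx, hinv.2 _ (List.getElem_mem hx)]; omega
            have hlt := pvFcount_mark_lt v (pos.1 + dD.1) (pos.2 + dD.2) hx hy
              (Bool.not_eq_true _ ▸ eq_false_of_ne_true hv)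
            obtain ⟨f, rfl⟩ : ∃ f, fuel = f + 1 := by
              cases fuel with
              | zero => omega
              | succ f => exact Exists.intro f rfl
            rw [if_neg hv, pvDfs]
            have hm : pvInv n.toNat (pvMark v (pos.1 + dD.1, pos.2 + dD.2)) :=
              pvInv_mark _ hinv
            rw [pvRun]
            simp only [if_pos hb, if_neg hw, dif_neg hv]
            have hcond : (pos.1 + dD.1).toNat < v.length ∧
                (pos.2 + dD.2).toNat < (v.getD (pos.1 + dD.1).toNat []).length := ⟨hx, hy⟩
            rw [ih f n board (pvMark v (pos.1 + dD.1, pos.2 + dD.2)) ps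
              (pos.1 + dD.1, pos.2 + dD.2) ["up", "down", "right", "left"] pvDeltas
              ((pos, dsD') :: rest) pvRel_dirs hm (by omega) (by simp; omega)]
            have hmono := pvDfsDirs_mono f n board ["up", "down", "right", "left"]
              (pos.1 + dD.1, pos.2 + dD.2) (pvMark v (pos.1 + dD.1, pos.2 + dD.2), ps) hm
            have hfc2 : pvFcount (pvDfsDirs f n board (pos.1 + dD.1, pos.2 + dD.2)
                ["up", "down", "right", "left"]
                (pvMark v (pos.1 + dD.1, pos.2 + dD.2), ps)).1
                ≤ pvFcount (pvMark v (pos.1 + dD.1, pos.2 + dD.2)) := hmono.2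
            have := ih (f + 1) n board
              (pvDfsDirs f n board (pos.1 + dD.1, pos.2 + dD.2)
                ["up", "down", "right", "left"]
                (pvMark v (pos.1 + dD.1, pos.2 + dD.2), ps)).1
              (pvDfsDirs f n board (pos.1 + dD.1, pos.2 + dD.2)
                ["up", "down", "right", "left"]
                (pvMark v (pos.1 + dD.1, pos.2 + dD.2), ps)).2
              pos dsS' dsD' rest h2 hmono.1 (by omega) (by omega)
            have hy' : (pos.2 + dD.2).toNat < v[(pos.1 + dD.1).toNat].length := by
              rw [← List.getD_eq_getElem v [] hx]; exact hy
            simpa [hcond, hy'] using this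
      · have hout : pvOut n (pos.1 + dD.1, pos.2 + dD.2) = true := by
          cases hcase : pvOut n (pos.1 + dD.1, pos.2 + dD.2)
          · exact absurd ((pvOut_false_iff _ _).mp hcase) hb
          · rfl
        simp only [hout, if_true]
        rw [pvRun]
        simp only [if_neg hb]
        exact ih fuel n board v ps pos dsS' dsD' rest h2 hinv hfc (by omega)

-- one component: B's stack run from the marked start equals A's dfs
theorem pvComp (n : Int) (board : List (List Int)) (p : Int × Int)
    (v : List (List Bool)) (hinv : pvInv n.toNat v) :
    pvRun n board [(p, pvDeltas)] (pvMark v p, []) =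
      pvDfs (n.toNat * n.toNat + 1) n board p (v, []) := by
  have hm : pvInv n.toNat (pvMark v p) := pvInv_mark p hinv
  have hfc : pvFcount (pvMark v p) ≤ n.toNat * n.toNat :=
    le_trans (pvFcount_mark_le v p) (pvFcount_le_sq hinv)
  rw [pvDfs]
  rw [pvSim (10 * pvFcount (pvMark v p) + 4) (n.toNat * n.toNat) n board
    (pvMark v p) [] p ["up", "down", "right", "left"] pvDeltas [] pvRel_dirs hm hfc (by simp)]
  rw [pvRun]

-- the shared row-major scan: the two loop bodies agree and preserve the shape invariant
theorem pvInner (n : Int) (board : List (List Int)) (i : Int) :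
    ∀ (js : List Int) (acc : List (List Bool) × List (List (Int × Int))),
    pvInv n.toNat acc.1 →
    (js.foldl (fun acc j =>
        if pvCell board (i, j) = 0 then acc
        else if pvVis acc.1 (i, j) then acc
        else
          let r := pvDfs (n.toNat * n.toNat + 1) n board (i, j) (acc.1, [])
          (r.1, acc.2 ++ [r.2])) acc
      = js.foldl (fun acc j =>
        if pvCell board (i, j) = 0 then acc
        else if pvVis acc.1 (i, j) then acc
        else
          let r := pvRun n board [((i, j), pvDeltas)] (pvMark acc.1 (i, j), [])
          (r.1, acc.2 ++ [r.2])) acc) ∧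
    pvInv n.toNat ((js.foldl (fun acc j =>
        if pvCell board (i, j) = 0 then acc
        else if pvVis acc.1 (i, j) then acc
        else
          let r := pvDfs (n.toNat * n.toNat + 1) n board (i, j) (acc.1, [])
          (r.1, acc.2 ++ [r.2])) acc).1) := by
  intro js
  induction js with
  | nil => intro acc h; exact ⟨rfl, h⟩
  | cons j js' ih =>
    intro acc h
    simp only [List.foldl_cons]
    by_cases hc : pvCell board (i, j) = 0
    · simp only [if_pos hc]; exact ih acc h
    · by_cases hv : pvVis acc.1 (i, j) = true
      · simp only [if_neg hc, if_pos hv]; exact ih acc h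
      · simp only [if_neg hc, if_neg hv]
        have hcomp := pvComp n board (i, j) acc.1 h
        have hinv1 : pvInv n.toNat (pvDfs (n.toNat * n.toNat + 1) n board (i, j) (acc.1, [])).1 := by
          rw [pvDfs]
          exact (pvDfsDirs_mono (n.toNat * n.toNat) n board _ (i, j)
            (pvMark acc.1 (i, j), []) (pvInv_mark _ h)).1
        rw [hcomp]
        exact ih _ hinv1

theorem pvOuter (n : Int) (board : List (List Int)) :
    ∀ (is : List Int) (acc : List (List Bool) × List (List (Int × Int))),
    pvInv n.toNat acc.1 →
    (is.foldl (fun acc i =>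
        (PySem.List.pyRange 0 n 1).foldl (fun acc j =>
          if pvCell board (i, j) = 0 then acc
          else if pvVis acc.1 (i, j) then acc
          else
            let r := pvDfs (n.toNat * n.toNat + 1) n board (i, j) (acc.1, [])
            (r.1, acc.2 ++ [r.2])) acc) acc
      = is.foldl (fun acc i =>
        (PySem.List.pyRange 0 n 1).foldl (fun acc j =>
          if pvCell board (i, j) = 0 then acc
          else if pvVis acc.1 (i, j) then acc
          else
            let r := pvRun n board [((i, j), pvDeltas)] (pvMark acc.1 (i, j), [])
            (r.1, acc.2 ++ [r.2])) acc) acc) := by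
  intro is
  induction is with
  | nil => intro acc h; rfl
  | cons i is' ih =>
    intro acc h
    simp only [List.foldl_cons]
    have hin := pvInner n board i (PySem.List.pyRange 0 n 1) acc h
    rw [← hin.1]
    exact ih _ hin.2

theorem pvInv_init (n : Int) :
    pvInv n.toNat (List.replicate n.toNat (List.replicate n.toNat (false : Bool))) := by
  refine ⟨List.length_replicate, ?_⟩
  intro r hr
  rw [List.eq_of_mem_replicate hr]
  exact List.length_replicate

-- ===== VERDICT (by name: the statement is the Claim_ definition above) =====
theorem get_part_list_spec : Claim_equal_get_part_list := by
  intro n board _ _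
  unfold Spec_get_part_list get_part_list get_part_list_alt
  exact congrArg Prod.snd
    (pvOuter n board (PySem.List.pyRange 0 n 1) _ (pvInv_init n))
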